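-- pv_equiv track=rewrite | github.com/amirkashi/interviewBit | Graph/Smallest_sequence_with_given_Prime.py | solve
-- ===== SOURCE A (Python) =====
-- def solve(A, B, C, D):
--     ans = []
--     lst = set()
--     lst.add(A)
--     lst.add(B)
--     lst.add(C)
--     for i in range(D):
--         Min = min(lst)
--         ans.append(Min)
--         lst.add(Min * A)
--         lst.add(Min * B)
--         lst.add(Min * C)
--         lst.remove(Min)
--     return ans
-- ===== SOURCE B (Python) =====
-- def _insert_unique(cand, x):
--     # binary search for x's position in the sorted list cand; insert unless present
--     lo, hi = 0, len(cand)
--     while lo < hi: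
--         mid = (lo + hi) // 2
--         if cand[mid] < x:
--             lo = mid + 1
--         else:
--             hi = mid
--     if lo == len(cand) or cand[lo] != x:
--         cand.insert(lo, x)
--
-- def solve(A, B, C, D):
--     # candidates kept as a sorted, duplicate-free list: the next output is its head
--     cand = sorted({A, B, C})
--     ans = []
--     for _ in range(D):
--         m = cand[0]
--         cand = cand[1:]
--         for x in (m * A, m * B, m * C):
--             if x != m:
--                 _insert_unique(cand, x)
--         ans.append(m)
--     return ans
-- ===== Notes on version B (the rewrite author's own statement) =====
-- stated objective: faster
-- what changed: B keeps the candidate pool as a sorted duplicate-free list whose head is the next output, inserting each new product at its binary-search position, instead of A's set re-scanned with min() on every iteration.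
import Mathlib
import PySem

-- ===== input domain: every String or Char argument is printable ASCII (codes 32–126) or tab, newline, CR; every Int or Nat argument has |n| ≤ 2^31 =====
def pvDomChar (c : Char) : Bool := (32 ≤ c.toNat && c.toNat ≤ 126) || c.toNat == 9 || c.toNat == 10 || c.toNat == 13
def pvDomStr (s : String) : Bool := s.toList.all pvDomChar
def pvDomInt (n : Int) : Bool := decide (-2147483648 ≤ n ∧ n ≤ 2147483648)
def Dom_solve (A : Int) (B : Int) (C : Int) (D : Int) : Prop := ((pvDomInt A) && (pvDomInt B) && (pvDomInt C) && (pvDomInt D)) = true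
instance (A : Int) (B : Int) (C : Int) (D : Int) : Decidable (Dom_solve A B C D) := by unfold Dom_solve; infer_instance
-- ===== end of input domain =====

-- B maintains the candidate pool as a sorted duplicate-free list (head = next output,
-- hand-written binary-search insertion) instead of A's set with a full min() scan per step.

-- ===== PORT A =====
-- loop 'for i in range(D)': state = (candidate set lst, output ans, reversed).
-- 'min(lst)' = PySem.List.min? (identity key; the minimum of a set of Ints is order-independent);
-- on the empty set Python raises ValueError (excluded by Pre_solve) — the port stops there.
def solveLoopA (A : Int) (B : Int) (C : Int) : Nat → PySem.Set Int → List Int → List Int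
  | 0, _, ans => ans.reverse
  | n + 1, lst, ans =>
    match PySem.List.min? lst (fun x => x) with
    | none => ans.reverse
    | some m =>
      let lst1 := PySem.Set.add (PySem.Set.add (PySem.Set.add lst (m * A)) (m * B)) (m * C)
      let lst2 := (PySem.Set.remove? lst1 m).getD lst1
      solveLoopA A B C n lst2 (m :: ans)

def solve (A : Int) (B : Int) (C : Int) (D : Int) : List Int :=
  solveLoopA A B C D.toNat
    (PySem.Set.add (PySem.Set.add (PySem.Set.add PySem.Set.empty A) B) C) []

-- ===== PORT B =====
-- while lo < hi: mid = (lo+hi)//2; if cand[mid] < x: lo = mid+1 else hi = mid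
-- (lo, hi are in-range Nat indices, so cand[mid] = getD mid 0 and '//2' = Nat division, exact here)
def bsLoop (cand : List Int) (x : Int) (lo hi : Nat) : Nat :=
  if lo < hi then
    let mid := (lo + hi) / 2
    if cand.getD mid 0 < x then bsLoop cand x (mid + 1) hi
    else bsLoop cand x lo mid
  else lo
termination_by hi - lo
decreasing_by
  · omega
  · omega

-- port of _insert_unique (Source B)
def insertUnique (cand : List Int) (x : Int) : List Int :=
  let lo := bsLoop cand x 0 cand.length
  if lo = cand.length ∨ cand.getD lo 0 ≠ x then PySem.List.insert cand (lo : Int) x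
  else cand

-- loop 'for _ in range(D)': state = (sorted candidate list, output ans, reversed).
-- 'cand[0]' on the empty list raises IndexError (excluded by Pre_solve) — the port stops there.
def solveLoopB (A : Int) (B : Int) (C : Int) : Nat → List Int → List Int → List Int
  | 0, _, ans => ans.reverse
  | n + 1, cand, ans =>
    match cand with
    | [] => ans.reverse
    | m :: rest =>
      let c1 := if m * A ≠ m then insertUnique rest (m * A) else rest
      let c2 := if m * B ≠ m then insertUnique c1 (m * B) else c1
      let c3 := if m * C ≠ m then insertUnique c2 (m * C) else c2
      solveLoopB A B C n c3 (m :: ans)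

def solve_alt (A : Int) (B : Int) (C : Int) (D : Int) : List Int :=
  solveLoopB A B C D.toNat
    (PySem.List.sorted (PySem.Set.ofList [A, B, C]) (fun x => x) false) []

-- ===== PRECONDITION & SPEC =====
-- Pre_solve excludes exactly the inputs on which A raises (ValueError: min() of an empty set):
-- that happens iff A, B, C all lie in {0, 1} and the pool dies out (after 1 step if A=B=C,
-- after 3 steps otherwise); B raises IndexError on exactly the same inputs.
def Pre_solve (A : Int) (B : Int) (C : Int) (D : Int) : Prop :=
  ¬ ((A = 0 ∨ A = 1) ∧ (B = 0 ∨ B = 1) ∧ (C = 0 ∨ C = 1) ∧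
     ((A = B ∧ B = C ∧ 2 ≤ D) ∨ (¬ (A = B ∧ B = C) ∧ 4 ≤ D)))
instance (A : Int) (B : Int) (C : Int) (D : Int) : Decidable (Pre_solve A B C D) := by
  unfold Pre_solve; infer_instance

def pvWitness_solve : Int × Int × Int × Int := (2, 3, 5, 10)

def Spec_solve (A : Int) (B : Int) (C : Int) (D : Int) (out : List Int) : Prop := out = solve_alt A B C D
instance (A : Int) (B : Int) (C : Int) (D : Int) (out : List Int) : Decidable (Spec_solve A B C D out) := by
  unfold Spec_solve; infer_instance

-- ===== CLAIM (what is proved, stated in full; the proofs are below) =====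
def Claim_equal_solve : Prop := ∀ (A : Int) (B : Int) (C : Int) (D : Int), Dom_solve A B C D → Pre_solve A B C D → Spec_solve A B C D (solve A B C D)

-- ===== LEMMAS AND PROOFS =====

-- binary-search invariant: the returned index splits cand into (< x) and (≥ x) parts
lemma getD_eq_getElem' (cand : List Int) (k : Nat) (hk : k < cand.length) :
    cand.getD k 0 = cand[k] := by
  rw [List.getD_eq_getElem?_getD, List.getElem?_eq_getElem hk]; rfl

lemma bsLoop_spec (cand : List Int) (x : Int) :
    ∀ (d lo hi : Nat), hi - lo ≤ d → hi ≤ cand.length → lo ≤ hi →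
    cand.Pairwise (· ≤ ·) →
    (∀ k, k < lo → cand.getD k 0 < x) →
    (∀ k, hi ≤ k → k < cand.length → ¬ cand.getD k 0 < x) →
    bsLoop cand x lo hi ≤ cand.length ∧
    (∀ k, k < bsLoop cand x lo hi → cand.getD k 0 < x) ∧
    (∀ k, bsLoop cand x lo hi ≤ k → k < cand.length → ¬ cand.getD k 0 < x) := by
  intro d
  induction d with
  | zero =>
    intro lo hi hd hhi hlo hsort hL hR
    have : ¬ lo < hi := by omega
    rw [bsLoop]
    simp only [this, if_false]
    exact ⟨by omega, hL, fun k hk hk2 => hR k (by omega) hk2⟩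
  | succ d ih =>
    intro lo hi hd hhi hlo hsort hL hR
    rw [bsLoop]
    by_cases h : lo < hi
    · simp only [h, if_true]
      have hmid : (lo + hi) / 2 < hi := by omega
      have hmidlo : lo ≤ (lo + hi) / 2 := by omega
      have hmono : ∀ p q, p ≤ q → q < cand.length → cand.getD p 0 ≤ cand.getD q 0 := by
        intro p q hpq hq
        rcases Nat.eq_or_lt_of_le hpq with rfl | hlt
        · exact le_refl _
        · have := (List.pairwise_iff_getElem (R := (· ≤ · : Int → Int → Prop))).mp hsort p q
            (by omega) hq hlt
          rw [getD_eq_getElem' cand p (by omega), getD_eq_getElem' cand q hq]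
          exact this
      by_cases hc : cand.getD ((lo + hi) / 2) 0 < x
      · simp only [hc, if_true]
        exact ih ((lo + hi) / 2 + 1) hi (by omega) hhi (by omega) hsort
          (fun k hk => lt_of_le_of_lt (hmono k ((lo + hi) / 2) (by omega) (by omega)) hc) hR
      · simp only [hc, if_false]
        exact ih lo ((lo + hi) / 2) (by omega) (by omega) hmidlo hsort hL
          (fun k hk hk2 => fun hlt => hc (lt_of_le_of_lt (hmono ((lo + hi) / 2) k hk hk2) hlt))
    · simp only [h, if_false]
      exact ⟨by omega, hL, fun k hk hk2 => hR k (by omega) hk2⟩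

-- insertUnique on a strictly sorted list: stays strictly sorted, members = {x} ∪ old members
lemma insertUnique_spec (cand : List Int) (x : Int) (h : cand.Pairwise (· < ·)) :
    (insertUnique cand x).Pairwise (· < ·) ∧
    (∀ y, y ∈ insertUnique cand x ↔ y = x ∨ y ∈ cand) := by
  obtain ⟨h1, h2, h3⟩ := bsLoop_spec cand x cand.length 0 cand.length (by omega) (le_refl _)
    (Nat.zero_le _) (h.imp fun hab => le_of_lt hab) (by omega) (by omega)
  set lo := bsLoop cand x 0 cand.length with hlo
  have hgetD := getD_eq_getElem' cand
  unfold insertUnique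
  rw [← hlo]
  by_cases hcase : lo = cand.length ∨ cand.getD lo 0 ≠ x
  · -- x is not in cand; it is inserted at position lo
    have hnotmem : x ∉ cand := by
      intro hmem
      obtain ⟨k, hk, hkx⟩ := List.mem_iff_getElem.mp hmem
      rcases Nat.lt_or_ge k lo with hkl | hkl
      · have := h2 k hkl
        rw [hgetD k hk, hkx] at this
        exact lt_irrefl _ this
      · have hlo_len : lo < cand.length := by omega
        have hxlo := h3 lo (le_refl _) hlo_len
        rw [hgetD lo hlo_len] at hxlo
        have hc : cand[lo] ≠ x := by
          rcases hcase with hc | hc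
          · omega
          · rw [hgetD lo hlo_len] at hc; exact hc
        rcases Nat.eq_or_lt_of_le hkl with heq | hlt
        · subst heq; exact hc hkx
        · have hs := (List.pairwise_iff_getElem (R := (· < · : Int → Int → Prop))).mp
            h lo k hlo_len hk hlt
          rw [hkx] at hs
          exact hxlo hs
    have htake : ∀ y ∈ List.take lo cand, y < x := by
      intro y hy
      obtain ⟨k, hk, hky⟩ := List.mem_take_iff_getElem.mp hy
      have := h2 k (by omega)
      rw [hgetD k (by omega), hky] at this
      exact this
    have hdrop : ∀ y ∈ List.drop lo cand, x < y := by
      intro y hy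
      have hyc : y ∈ cand := (List.drop_sublist _ _).mem hy
      obtain ⟨k, hk, hky⟩ := List.mem_drop_iff_getElem.mp hy
      have h3' := h3 (lo + k) (by omega) (by omega)
      rw [hgetD (lo + k) (by omega), hky] at h3'
      have hne : y ≠ x := fun hyx => hnotmem (hyx ▸ hyc)
      omega
    simp only [hcase, if_true]
    rw [show ((lo : Int)) = ((lo : Nat) : Int) from rfl,
        PySem.List.insert_natCast cand lo x h1]
    have hsplit : ∀ y : Int, y ∈ cand ↔ y ∈ List.take lo cand ∨ y ∈ List.drop lo cand := by
      intro y
      conv_lhs => rw [← List.take_append_drop lo cand]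
      exact List.mem_append
    constructor
    · rw [List.pairwise_append]
      refine ⟨h.sublist (List.take_sublist _ _),
        List.pairwise_cons.mpr ⟨hdrop, h.sublist (List.drop_sublist _ _)⟩, ?_⟩
      intro a ha b hb
      rcases List.mem_cons.mp hb with rfl | hb
      · exact htake a ha
      · exact lt_trans (htake a ha) (hdrop b hb)
    · intro y
      rw [hsplit y]
      simp only [List.mem_append, List.mem_cons]
      tauto
  · -- x already present: cand unchanged
    simp only [hcase, if_false]
    push Not at hcase
    obtain ⟨hlt, heq⟩ := hcase
    have hlo_len : lo < cand.length := by omega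
    have hxmem : x ∈ cand := by
      rw [← heq, hgetD lo hlo_len]
      exact List.getElem_mem _
    refine ⟨h, fun y => ⟨fun hy => Or.inr hy, fun hy => ?_⟩⟩
    rcases hy with rfl | hy
    · exact hxmem
    · exact hy

-- propositional bookkeeping for one loop step (add three products, delete the minimum)
lemma mem_step_aux (y m a b c : Int) (S : Prop) :
    (y = c ∧ c ≠ m ∨ y = b ∧ b ≠ m ∨ y = a ∧ a ≠ m ∨ S ∧ y ≠ m) ↔
    (((S ∨ y = a) ∨ y = b) ∨ y = c) ∧ y ≠ m := by
  by_cases h1 : y = a <;> by_cases h2 : y = b <;> by_cases h3 : y = c <;>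
    by_cases h4 : y = m <;> subst_vars <;> tauto

-- main loop invariant: B's sorted list has exactly the members of A's set
lemma loop_eq (A B C : Int) :
    ∀ (n : Nat) (s : PySem.Set Int) (cand ans : List Int),
    cand.Pairwise (· < ·) → (∀ y, y ∈ cand ↔ y ∈ s) →
    solveLoopA A B C n s ans = solveLoopB A B C n cand ans := by
  intro n
  induction n with
  | zero => intro s cand ans _ _; rfl
  | succ n ih =>
    intro s cand ans hsort hmem
    cases cand with
    | nil =>
      have hs : s = [] := List.eq_nil_iff_forall_not_mem.mpr
        (fun y hy => by simpa using (hmem y).mpr hy)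
      subst hs
      rw [solveLoopA, solveLoopB,
        (PySem.List.min?_eq_none_iff ([] : List Int) (fun x => x)).mpr rfl]
    | cons m rest =>
      -- A's min is B's head
      have hmS : m ∈ s := (hmem m).mp List.mem_cons_self
      have hsne : s ≠ [] := fun h => by subst h; exact (List.not_mem_nil (a := m)) hmS
      obtain ⟨m', hm'⟩ : ∃ m', PySem.List.min? s (fun x => x) = some m' := by
        cases hmin : PySem.List.min? s (fun x => x) with
        | none => exact absurd ((PySem.List.min?_eq_none_iff s _).mp hmin) hsne
        | some v => exact ⟨v, rfl⟩
      have hm'm : m' = m := by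
        have h1 : m' ≤ m := PySem.List.min?_isMin hm' m hmS
        have h2 : m ≤ m' := by
          have hmem' : m' ∈ m :: rest := (hmem m').mpr (PySem.List.min?_mem hm')
          rcases List.mem_cons.mp hmem' with rfl | hr
          · exact le_refl _
          · exact le_of_lt ((List.pairwise_cons.mp hsort).1 m' hr)
        omega
      rw [hm'm] at hm'
      have hrest_sort : rest.Pairwise (· < ·) := (List.pairwise_cons.mp hsort).2
      have hm_not_rest : m ∉ rest := fun hr =>
        lt_irrefl m ((List.pairwise_cons.mp hsort).1 m hr)
      have hrest_mem : ∀ y, y ∈ rest ↔ y ∈ s ∧ y ≠ m := by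
        intro y
        constructor
        · intro hy
          exact ⟨(hmem y).mp (List.mem_cons_of_mem _ hy), fun h => hm_not_rest (h ▸ hy)⟩
        · rintro ⟨hy, hne⟩
          rcases List.mem_cons.mp ((hmem y).mpr hy) with rfl | h
          · exact absurd rfl hne
          · exact h
      -- unfold one step of both loops
      rw [solveLoopA, solveLoopB, hm']
      dsimp only
      have hmS1 : m ∈ PySem.Set.add (PySem.Set.add (PySem.Set.add s (m * A)) (m * B)) (m * C) := by
        simp [PySem.Set.mem_add, hmS]
      rw [PySem.Set.remove?_of_mem hmS1]
      simp only [Option.getD_some]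
      -- B's next state after the three conditional inserts
      have step : ∀ (c : List Int) (p : Int),
          c.Pairwise (· < ·) →
          (if p ≠ m then insertUnique c p else c).Pairwise (· < ·) ∧
          (∀ y, y ∈ (if p ≠ m then insertUnique c p else c) ↔ (y = p ∧ p ≠ m) ∨ y ∈ c) := by
        intro c p hcs
        by_cases hp : p ≠ m
        · obtain ⟨hq1, hq2⟩ := insertUnique_spec c p hcs
          rw [if_pos hp]
          exact ⟨hq1, fun y => by rw [hq2 y]; tauto⟩
        · rw [if_neg hp]
          exact ⟨hcs, fun y => by tauto⟩
      obtain ⟨hs1, hm1⟩ := step rest (m * A) hrest_sort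
      obtain ⟨hs2, hm2⟩ := step _ (m * B) hs1
      obtain ⟨hs3, hm3⟩ := step _ (m * C) hs2
      apply ih _ _ _ hs3
      intro y
      rw [hm3, hm2, hm1]
      simp only [PySem.Set.mem_discard, PySem.Set.mem_add, hrest_mem y]
      exact mem_step_aux _ _ _ _ _ _

-- ===== VERDICT (by name: the statement is the Claim_ definition above) =====
theorem solve_spec : Claim_equal_solve := by
  intro A B C D _ _
  unfold Spec_solve solve solve_alt
  apply loop_eq
  · exact PySem.List.sorted_ofList_pairwise_lt [A, B, C]
  · intro y
    rw [PySem.List.mem_sorted, PySem.Set.mem_ofList]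
    simp [PySem.Set.mem_add, PySem.Set.empty]
    tauto
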